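-- pv_equiv track=rewrite | github.com/robertoallende/coderipple | src/tourist_guide_agent.py | _identify_user_facing_changes
-- ===== SOURCE A (Python) =====
-- from typing import Dict, Any, List, Optional
--
-- def _identify_user_facing_changes(change_type: str, affected_files: List[str], commit_messages: List[str]) -> Dict[str, Any]:
--     """Identify which changes affect user workflows"""
--
--     user_facing_indicators = {
--         'cli_changes': ['cli.py', 'main.py', 'command', 'arg', 'option'],
--         'api_changes': ['api/', 'endpoint', 'route', 'handler', 'controller'],
--         'config_changes': ['config', 'settings', '.env', 'requirements'],
--         'interface_changes': ['interface', 'ui/', 'frontend/', 'public/'],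
--         'documentation_files': ['readme', '.md', 'docs/', 'guide', 'tutorial'],
--         'examples': ['example', 'sample', 'demo', 'tutorial']
--     }
--
--     identified_changes = {}
--
--     for category, indicators in user_facing_indicators.items():
--         matches = []
--
--         # Check files
--         for file in affected_files:
--             if any(indicator in file.lower() for indicator in indicators):
--                 matches.append(f"File: {file}")
--
--         # Check commit messages
--         for msg in commit_messages:
--             if any(indicator in msg.lower() for indicator in indicators):
--                 matches.append(f"Commit: {msg[:50]}...")
--
--         if matches:
--             identified_changes[category] = matches
--
--     return identified_changes
-- ===== SOURCE B (Python) =====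
-- from typing import Dict, Any, List
--
-- def _identify_user_facing_changes(change_type: str, affected_files: List[str], commit_messages: List[str]) -> Dict[str, Any]:
--     """Identify which changes affect user workflows.
--
--     Different algorithm: build an inverted index indicator -> categories (deduplicating
--     indicators shared between categories), annotate each item once with the SET of
--     categories it hits, then assemble per-category lists by set membership only."""
--     user_facing_indicators = {
--         'cli_changes': ['cli.py', 'main.py', 'command', 'arg', 'option'],
--         'api_changes': ['api/', 'endpoint', 'route', 'handler', 'controller'],
--         'config_changes': ['config', 'settings', '.env', 'requirements'],
--         'interface_changes': ['interface', 'ui/', 'frontend/', 'public/'],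
--         'documentation_files': ['readme', '.md', 'docs/', 'guide', 'tutorial'],
--         'examples': ['example', 'sample', 'demo', 'tutorial']
--     }
--     # inverted index: each distinct indicator -> the categories that list it
--     index = {}
--     for category, indicators in user_facing_indicators.items():
--         for indicator in indicators:
--             index.setdefault(indicator, []).append(category)
--     # tagged items with their lowercased text (files first, then commits)
--     items = [(f"File: {f}", f.lower()) for f in affected_files] \
--           + [(f"Commit: {m[:50]}...", m.lower()) for m in commit_messages]
--     # one substring scan per item over the DISTINCT indicators; record hit categories as a set
--     annotated = []
--     for tag, text in items:
--         cats = set()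
--         for indicator, categories in index.items():
--             if indicator in text:
--                 cats.update(categories)
--         annotated.append((tag, cats))
--     # assemble output by membership tests only
--     identified_changes = {}
--     for category in user_facing_indicators:
--         matches = [tag for tag, cats in annotated if category in cats]
--         if matches:
--             identified_changes[category] = matches
--     return identified_changes
-- ===== Notes on version B (the rewrite author's own statement) =====
-- stated objective: alternative
-- what changed: B builds an inverted index indicator->categories (deduplicating the shared 'tutorial' indicator), annotates each file/commit once with the SET of categories it hits via one scan over the distinct indicators, and then assembles each category's list purely by set-membership tests, instead of A's per-category rescans of all files and commits with repeated lower() and substring tests.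
import Mathlib
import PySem

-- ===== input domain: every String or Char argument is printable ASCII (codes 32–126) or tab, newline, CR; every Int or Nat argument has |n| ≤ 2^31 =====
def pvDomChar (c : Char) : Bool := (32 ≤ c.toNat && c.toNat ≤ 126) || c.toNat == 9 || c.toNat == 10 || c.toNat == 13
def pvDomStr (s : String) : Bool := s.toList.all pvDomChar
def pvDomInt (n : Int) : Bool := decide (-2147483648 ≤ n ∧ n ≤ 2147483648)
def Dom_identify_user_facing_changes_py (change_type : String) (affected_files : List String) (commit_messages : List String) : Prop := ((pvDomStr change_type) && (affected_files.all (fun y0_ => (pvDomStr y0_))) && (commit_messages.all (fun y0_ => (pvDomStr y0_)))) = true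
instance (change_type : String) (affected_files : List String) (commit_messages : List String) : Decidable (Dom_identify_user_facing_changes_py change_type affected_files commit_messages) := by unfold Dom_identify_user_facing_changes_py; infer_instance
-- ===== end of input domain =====

-- B uses a different algorithm: an inverted index indicator → categories (dedup of the
-- shared 'tutorial'), one scan per item annotating it with the SET of categories it hits,
-- then per-category assembly by set membership only; objective 'alternative'.

-- the literal indicator table shared by both Pythons
def pvIndicators : List (String × List String) :=
  [("cli_changes", ["cli.py", "main.py", "command", "arg", "option"]),
   ("api_changes", ["api/", "endpoint", "route", "handler", "controller"]),
   ("config_changes", ["config", "settings", ".env", "requirements"]),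
   ("interface_changes", ["interface", "ui/", "frontend/", "public/"]),
   ("documentation_files", ["readme", ".md", "docs/", "guide", "tutorial"]),
   ("examples", ["example", "sample", "demo", "tutorial"])]

def pvTagFile (f : String) : String := "File: " ++ f
def pvTagCommit (m : String) : String := "Commit: " ++ PySem.Str.slice m none (some 50) ++ "..."

-- ===== PORT A =====
-- A: outer loop over categories; per category scan files (lowering each file),
-- then commit messages, appending tagged matches; keep the category if nonempty.
def identify_user_facing_changes_py (change_type : String) (affected_files : List String) (commit_messages : List String) : List (String × List String) :=
  pvIndicators.foldl (fun identified p =>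
    let matches₀ : List String :=
      affected_files.foldl (fun ms file =>
        if p.2.any (fun ind => PySem.Str.isIn ind (PySem.Str.lower file)) then ms ++ [pvTagFile file] else ms) []
    let matches₁ : List String :=
      commit_messages.foldl (fun ms msg =>
        if p.2.any (fun ind => PySem.Str.isIn ind (PySem.Str.lower msg)) then ms ++ [pvTagCommit msg] else ms) matches₀
    if matches₁ ≠ [] then identified ++ [(p.1, matches₁)] else identified) []

-- ===== PORT B =====
-- B: inverted index indicator → categories, built by setdefault-append
def pvIndexB : PySem.Dict String (List String) :=
  pvIndicators.foldl (fun d p =>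
    p.2.foldl (fun d ind => d.insert ind (d.getD ind [] ++ [p.1])) d) PySem.Dict.empty

-- cats for one lowered text: one scan over the distinct indicators, union of hit categories
def pvCatsOf (text : String) : PySem.Set String :=
  pvIndexB.items.foldl (fun cats q =>
    if PySem.Str.isIn q.1 text then PySem.Set.update cats q.2 else cats) PySem.Set.empty

def identify_user_facing_changes_py_alt (change_type : String) (affected_files : List String) (commit_messages : List String) : List (String × List String) :=
  let items : List (String × String) :=
    affected_files.map (fun f => (pvTagFile f, PySem.Str.lower f)) ++
    commit_messages.map (fun m => (pvTagCommit m, PySem.Str.lower m))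
  let annotated : List (String × PySem.Set String) :=
    items.map (fun it => (it.1, pvCatsOf it.2))
  pvIndicators.foldl (fun identified p =>
    let ms := (annotated.filter (fun it => PySem.Set.contains it.2 p.1)).map (·.1)
    if ms ≠ [] then identified ++ [(p.1, ms)] else identified) []

-- ===== PRECONDITION & SPEC =====
def Spec_identify_user_facing_changes_py (change_type : String) (affected_files : List String) (commit_messages : List String) (out : List (String × List String)) : Prop := out = identify_user_facing_changes_py_alt change_type affected_files commit_messages
instance (change_type : String) (affected_files : List String) (commit_messages : List String) (out : List (String × List String)) : Decidable (Spec_identify_user_facing_changes_py change_type affected_files commit_messages out) := by unfold Spec_identify_user_facing_changes_py; infer_instance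

-- ===== CLAIM (what is proved, stated in full; the proofs are below) =====
def Claim_equal_identify_user_facing_changes_py : Prop := ∀ (change_type : String) (affected_files : List String) (commit_messages : List String), Dom_identify_user_facing_changes_py change_type affected_files commit_messages → Spec_identify_user_facing_changes_py change_type affected_files commit_messages (identify_user_facing_changes_py change_type affected_files commit_messages)

-- ===== LEMMAS AND PROOFS =====

-- does string x hit the indicator list of one category (on its lowered text)?
def pvHitT (inds : List String) (text : String) : Bool := inds.any (fun ind => PySem.Str.isIn ind text)

-- A-side matches of one category, in closed form
def pvMatches (inds : List String) (affected_files commit_messages : List String) : List String :=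
  (affected_files.filter (fun f => pvHitT inds (PySem.Str.lower f))).map pvTagFile ++
  (commit_messages.filter (fun m => pvHitT inds (PySem.Str.lower m))).map pvTagCommit

-- membership in the annotation fold
theorem pvMem_catsFold (text : String) (l : List (String × List String)) (s : PySem.Set String) (c : String) :
    (c ∈ l.foldl (fun cats q => if PySem.Str.isIn q.1 text then PySem.Set.update cats q.2 else cats) s)
    ↔ c ∈ s ∨ ∃ q ∈ l, PySem.Str.isIn q.1 text ∧ c ∈ q.2 := by
  induction l generalizing s with
  | nil => simp
  | cons hd tl ih =>
    simp only [List.foldl_cons, List.exists_mem_cons_iff]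
    rw [ih]
    cases h : PySem.Str.isIn hd.1 text with
    | true =>
      simp [PySem.Set.mem_update]
      tauto
    | false =>
      simp only [Bool.false_eq_true, if_false, false_and]
      tauto

-- the built inverted index, as a literal items list
theorem pvIndexB_items :
    pvIndexB.items =
      [("cli.py", ["cli_changes"]), ("main.py", ["cli_changes"]), ("command", ["cli_changes"]),
       ("arg", ["cli_changes"]), ("option", ["cli_changes"]),
       ("api/", ["api_changes"]), ("endpoint", ["api_changes"]), ("route", ["api_changes"]),
       ("handler", ["api_changes"]), ("controller", ["api_changes"]),
       ("config", ["config_changes"]), ("settings", ["config_changes"]), (".env", ["config_changes"]),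
       ("requirements", ["config_changes"]),
       ("interface", ["interface_changes"]), ("ui/", ["interface_changes"]),
       ("frontend/", ["interface_changes"]), ("public/", ["interface_changes"]),
       ("readme", ["documentation_files"]), (".md", ["documentation_files"]),
       ("docs/", ["documentation_files"]), ("guide", ["documentation_files"]),
       ("tutorial", ["documentation_files", "examples"]),
       ("example", ["examples"]), ("sample", ["examples"]), ("demo", ["examples"])] := by
  decide

-- for a table row (c, inds), membership of c in pvCatsOf text is exactly the hit test on inds
theorem pvMem_catsOf (c : String) (inds : List String) (hc : (c, inds) ∈ pvIndicators) (text : String) :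
    (c ∈ pvCatsOf text) ↔ pvHitT inds text = true := by
  unfold pvCatsOf
  rw [pvIndexB_items, pvMem_catsFold]
  simp only [pvIndicators, List.mem_cons, List.not_mem_nil, or_false, Prod.mk.injEq] at hc
  rcases hc with ⟨rfl, rfl⟩ | ⟨rfl, rfl⟩ | ⟨rfl, rfl⟩ | ⟨rfl, rfl⟩ | ⟨rfl, rfl⟩ | ⟨rfl, rfl⟩ <;>
    · simp [pvHitT, PySem.Set.empty]
      try tauto

-- B's per-category matches list is A's closed-form matches
theorem pvB_matches (c : String) (inds : List String) (hc : (c, inds) ∈ pvIndicators)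
    (affected_files commit_messages : List String) :
    (((affected_files.map (fun f => (pvTagFile f, PySem.Str.lower f)) ++
       commit_messages.map (fun m => (pvTagCommit m, PySem.Str.lower m))).map
        (fun it => (it.1, pvCatsOf it.2))).filter (fun it => PySem.Set.contains it.2 c)).map (·.1)
    = pvMatches inds affected_files commit_messages := by
  have hfilt : ∀ t : String, PySem.Set.contains (pvCatsOf t) c = pvHitT inds t := by
    intro t
    rw [Bool.eq_iff_iff, PySem.Set.contains_iff]
    exact pvMem_catsOf c inds hc t
  simp only [List.map_append, List.filter_append, List.filter_map, List.map_map, pvMatches]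
  congr 1 <;> simp only [Function.comp_def, hfilt]

-- A's per-category matches list, in closed form
theorem pvA_matches (inds : List String) (affected_files commit_messages : List String) :
    commit_messages.foldl (fun ms msg =>
        if inds.any (fun ind => PySem.Str.isIn ind (PySem.Str.lower msg)) then ms ++ [pvTagCommit msg] else ms)
      (affected_files.foldl (fun ms file =>
        if inds.any (fun ind => PySem.Str.isIn ind (PySem.Str.lower file)) then ms ++ [pvTagFile file] else ms) [])
    = pvMatches inds affected_files commit_messages := by
  simp only [PySem.List.foldl_append_if, List.nil_append]
  rfl

-- ===== VERDICT (by name: the statement is the Claim_ definition above) =====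
theorem identify_user_facing_changes_py_spec : Claim_equal_identify_user_facing_changes_py := by
  intro change_type affected_files commit_messages _
  unfold Spec_identify_user_facing_changes_py identify_user_facing_changes_py identify_user_facing_changes_py_alt
  apply PySem.List.foldl_congr_mem
  intro acc p hp
  simp only [pvA_matches p.2 affected_files commit_messages]
  rw [pvB_matches p.1 p.2 (by simpa using hp) affected_files commit_messages]
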